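-- pv_equiv track=rewrite | github.com/AccessiTech/EndogenAI | scripts/testing/scaffold_tests.py | _extract_py_class_body
-- ===== SOURCE A (Python) =====
-- def _extract_py_class_body(src: str, start: int) -> str:
--     """Return only the indented body lines of a Python class beginning at *start*."""
--     lines = src[start:].splitlines(keepends=True)
--     body_lines: list[str] = []
--     found_body = False
--     for line in lines:
--         if not found_body:
--             if line.strip():
--                 found_body = True
--                 body_lines.append(line)
--         else:
--             if line and not line[0].isspace() and line.strip():
--                 break
--             body_lines.append(line)
--     return "".join(body_lines)
-- ===== SOURCE B (Python) =====
-- def _extract_py_class_body(src: str, start: int) -> str: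
--     """Return only the indented body lines of a Python class beginning at *start*."""
--     lines = src[start:].splitlines(keepends=True)
--     i = next((k for k, ln in enumerate(lines) if ln.strip()), None)
--     if i is None:
--         return ""
--     j = next((k for k in range(i + 1, len(lines))
--               if lines[k] and not lines[k][0].isspace() and lines[k].strip()),
--              len(lines))
--     return "".join(lines[i:j])
-- ===== Notes on version B (the rewrite author's own statement) =====
-- stated objective: simpler
-- what changed: Replaces A's found_body state-machine loop over the lines with two boundary-index searches (first non-blank line, then the first top-level line after it) and a single slice join.
import Mathlib
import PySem

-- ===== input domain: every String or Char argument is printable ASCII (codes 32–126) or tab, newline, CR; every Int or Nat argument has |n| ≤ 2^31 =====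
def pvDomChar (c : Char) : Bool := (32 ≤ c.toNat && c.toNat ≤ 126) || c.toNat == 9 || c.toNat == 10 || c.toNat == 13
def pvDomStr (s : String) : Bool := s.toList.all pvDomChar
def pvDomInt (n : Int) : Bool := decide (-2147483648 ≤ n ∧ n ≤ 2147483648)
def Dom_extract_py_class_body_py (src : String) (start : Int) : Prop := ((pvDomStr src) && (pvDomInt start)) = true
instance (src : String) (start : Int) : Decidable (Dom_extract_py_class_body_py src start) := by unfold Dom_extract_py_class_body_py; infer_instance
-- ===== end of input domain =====

-- B replaces A's found_body state machine with two boundary indices and one slice join (objective: simpler decomposition).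

-- splitlines(keepends=True), hand-ported: exact for the line breaks '\n', '\r', '\r\n',
-- which are the only line-break characters admitted by Dom (printable ASCII + tab/newline/CR).
def pvSplitlinesKeep (acc : List Char) : List Char → List (List Char)
  | [] => if acc = [] then [] else [acc.reverse]
  | '\r' :: '\n' :: rest => (acc.reverse ++ ['\r', '\n']) :: pvSplitlinesKeep [] rest
  | '\n' :: rest => (acc.reverse ++ ['\n']) :: pvSplitlinesKeep [] rest
  | '\r' :: rest => (acc.reverse ++ ['\r']) :: pvSplitlinesKeep [] rest
  | c :: rest => pvSplitlinesKeep (c :: acc) rest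

-- line.strip() is truthy
def pvBlankP (l : List Char) : Bool := !(PySem.Chars.strip l).isEmpty
-- 'line and not line[0].isspace() and line.strip()' (A's break test / B's end-of-body test)
def pvTopP (l : List Char) : Bool :=
  (match l with | [] => false | c :: _ => !PySem.Chars.isspace c) && pvBlankP l

-- ===== PORT A =====
-- the for-loop over lines with the found_body flag; returning [] transcribes 'break'
def pvGoA (found : Bool) : List (List Char) → List (List Char)
  | [] => []
  | l :: rest =>
    if found then
      if pvTopP l then [] else l :: pvGoA true rest
    else
      if pvBlankP l then l :: pvGoA true rest else pvGoA false rest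

def extract_py_class_body_py (src : String) (start : Int) : String :=
  let lines := pvSplitlinesKeep [] (PySem.Str.slice src (some start) none).toList
  String.ofList (PySem.Chars.join [] (pvGoA false lines))

-- ===== PORT B =====
def extract_py_class_body_py_alt (src : String) (start : Int) : String :=
  let lines := pvSplitlinesKeep [] (PySem.Str.slice src (some start) none).toList
  match lines.findIdx? pvBlankP with
  | none => ""
  | some i =>
    let j : Nat :=
      match (lines.drop (i + 1)).findIdx? pvTopP with
      | none => lines.length
      | some k => i + 1 + k
    String.ofList (PySem.Chars.join [] ((lines.drop i).take (j - i)))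

-- ===== PRECONDITION & SPEC =====
def Spec_extract_py_class_body_py (src : String) (start : Int) (out : String) : Prop := out = extract_py_class_body_py_alt src start
instance (src : String) (start : Int) (out : String) : Decidable (Spec_extract_py_class_body_py src start out) := by unfold Spec_extract_py_class_body_py; infer_instance

-- ===== CLAIM (what is proved, stated in full; the proofs are below) =====
def Claim_equal_extract_py_class_body_py : Prop := ∀ (src : String) (start : Int), Dom_extract_py_class_body_py src start → Spec_extract_py_class_body_py src start (extract_py_class_body_py src start)

-- ===== LEMMAS AND PROOFS =====

-- after the first kept line, A keeps lines up to the first top-level line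
theorem pvGoA_true (lines : List (List Char)) :
    pvGoA true lines =
      lines.take (match lines.findIdx? pvTopP with | none => lines.length | some k => k) := by
  induction lines with
  | nil => simp [pvGoA]
  | cons l rest ih =>
    by_cases h : pvTopP l = true
    · simp [pvGoA, h, List.findIdx?_cons]
    · simp only [pvGoA, h, Bool.false_eq_true, if_false, List.findIdx?_cons, ih]
      cases hf : rest.findIdx? pvTopP <;> simp

-- the skipping phase: A's result in terms of the first non-blank index
theorem pvGoA_false (lines : List (List Char)) :
    pvGoA false lines =
      match lines.findIdx? pvBlankP with
      | none => []
      | some i => (lines.drop i).take 1 ++ pvGoA true (lines.drop (i + 1)) := by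
  induction lines with
  | nil => simp [pvGoA]
  | cons l rest ih =>
    by_cases h : pvBlankP l = true
    · simp [pvGoA, h, List.findIdx?_cons]
    · simp only [pvGoA, h, Bool.false_eq_true, if_false, List.findIdx?_cons, ih]
      cases hf : rest.findIdx? pvBlankP <;> simp

theorem pvGoA_eq_slice (lines : List (List Char)) :
    pvGoA false lines =
      match lines.findIdx? pvBlankP with
      | none => []
      | some i =>
        (lines.drop i).take
          ((match (lines.drop (i + 1)).findIdx? pvTopP with
            | none => lines.length
            | some k => i + 1 + k) - i) := by
  rw [pvGoA_false]
  cases hf : lines.findIdx? pvBlankP with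
  | none => simp
  | some i =>
    have hi : i < lines.length := (List.findIdx?_eq_some_iff_findIdx_eq.mp hf).1
    have hdrop : lines.drop i = lines[i] :: lines.drop (i + 1) := List.drop_eq_getElem_cons hi
    dsimp only
    rw [pvGoA_true]
    cases hk : (lines.drop (i + 1)).findIdx? pvTopP with
    | none =>
      have h1 : lines.length - i = (lines.drop (i + 1)).length + 1 := by
        simp only [List.length_drop]; omega
      simp only [h1, hdrop, List.take_succ_cons, List.take_of_length_le (le_refl _), List.cons_append]
      simp
    | some k =>
      have h2 : i + 1 + k - i = 1 + k := by omega
      rw [h2, List.take_add, List.drop_drop, List.take_one, hdrop]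

-- ===== VERDICT (by name: the statement is the Claim_ definition above) =====
theorem extract_py_class_body_py_spec : Claim_equal_extract_py_class_body_py := by
  intro src start _
  unfold Spec_extract_py_class_body_py
  simp only [extract_py_class_body_py, extract_py_class_body_py_alt, pvGoA_eq_slice]
  cases hf : (pvSplitlinesKeep [] (PySem.Str.slice src (some start) none).toList).findIdx? pvBlankP with
  | none => simp only [PySem.Chars.join, List.intercalate]; rfl
  | some i => simp
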